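-- pv_equiv track=rewrite | github.com/jacobgarrison4/cognixia-python | points.py | minimum_points
-- ===== SOURCE A (Python) =====
-- def minimum_points(threshold, points):
--
--     #See if threshold can be acheived, if not, return all problems
--     if ((points[-1] - points[0]) < threshold):
--         return len(points)
--
--     #keep min points
--     min_points = points[0]
--
--     #They must solve first problem, start problem counter and index for which problem we are solving next
--     #go to next problem, if threshold met, increment counter and break
--     #if not met, go to i + 2 problem and check same criteria
--     #if neither were met, increment counter and set index to i + 3 problem
--     counter = 1
--     index = 1
--     thresh = False
--     while thresh == False:
--         if ((points[index] - min_points) >= threshold):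
--             counter += 1
--             thresh = True
--         elif ((points[index + 1] - min_points) >= threshold):
--             counter += 1
--             thresh = True
--         else:
--             counter += 1
--             index +=2
--     return counter
-- ===== SOURCE B (Python) =====
-- def minimum_points(threshold, points):
--     base = points[0]
--     if points[-1] - base < threshold:
--         return len(points)
--     # first index >= 1 whose score gap meets the threshold, then closed form:
--     # A's pair-stepping loop returns 1 + ceil(j/2) = 1 + (j + 1) // 2
--     j = next(i for i in range(1, len(points)) if points[i] - base >= threshold)
--     return 1 + (j + 1) // 2
-- ===== Notes on version B (the rewrite author's own statement) =====
-- stated objective: simpler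
-- what changed: Replaced A's stateful pair-stepping while-loop (index/counter/thresh flag) by a single scan for the first index j whose gap meets the threshold followed by the closed-form answer 1 + (j + 1) // 2.
import Mathlib
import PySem

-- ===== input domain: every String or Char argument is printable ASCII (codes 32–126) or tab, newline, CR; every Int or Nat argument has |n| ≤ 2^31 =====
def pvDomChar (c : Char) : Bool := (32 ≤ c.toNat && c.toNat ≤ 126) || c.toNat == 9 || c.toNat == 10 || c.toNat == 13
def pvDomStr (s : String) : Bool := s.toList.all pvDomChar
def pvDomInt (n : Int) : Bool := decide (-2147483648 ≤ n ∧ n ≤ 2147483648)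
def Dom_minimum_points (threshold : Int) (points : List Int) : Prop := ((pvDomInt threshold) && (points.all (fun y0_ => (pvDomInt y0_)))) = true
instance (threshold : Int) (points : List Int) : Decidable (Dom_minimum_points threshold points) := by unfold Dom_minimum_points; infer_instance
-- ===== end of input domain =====

-- B replaces A's pair-stepping while-loop state machine by a first-meeting-index scan
-- plus the closed form 1 + (j+1)//2 (objective: simpler; same asymptotic cost).

-- ===== PORT A =====
-- A's while-loop: index starts at 1, counter at 1; checks points[index] and
-- points[index+1]; on failure index += 2, counter += 1. pyGet? = none means the
-- Python IndexError (excluded by Pre_); the port returns 0 there (unreachable under Pre_).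
def pvLoopA (points : List Int) (threshold min_points : Int) (index : Nat) (counter : Int) : Int :=
  match h1 : PySem.List.pyGet? points (index : Int) with
  | none => 0
  | some v =>
    if v - min_points ≥ threshold then counter + 1
    else
      match h2 : PySem.List.pyGet? points ((index : Int) + 1) with
      | none => 0
      | some w =>
        if w - min_points ≥ threshold then counter + 1
        else pvLoopA points threshold min_points (index + 2) (counter + 1)
termination_by points.length - index
decreasing_by
  have : index + 1 < points.length := by
    have hc : ((index : Int) + 1) = ((index + 1 : Nat) : Int) := by push_cast; ring
    rw [hc, PySem.List.pyGet?_natCast] at h2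
    exact (List.getElem?_eq_some_iff.mp h2).1
  omega

def minimum_points (threshold : Int) (points : List Int) : Int :=
  match PySem.List.pyGet? points (-1), PySem.List.pyGet? points 0 with
  | some last, some first =>
    if last - first < threshold then (points.length : Int)
    else pvLoopA points threshold first 1 1
  | _, _ => 0   -- IndexError on empty list (excluded by Pre_)

-- ===== PORT B =====
-- the generator 'next(i for i in range(1, len(points)) if points[i] - base >= threshold)':
-- first index ≥ i meeting the threshold; none = StopIteration (excluded by Pre_).
def pvScanB (points : List Int) (threshold base : Int) (i : Nat) : Option Nat :=
  if h : i < points.length then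
    if points[i] - base ≥ threshold then some i else pvScanB points threshold base (i + 1)
  else none
termination_by points.length - i

def minimum_points_alt (threshold : Int) (points : List Int) : Int :=
  match PySem.List.pyGet? points 0 with
  | none => 0   -- IndexError on empty list (excluded by Pre_)
  | some base =>
    match PySem.List.pyGet? points (-1) with
    | none => 0
    | some last =>
      if last - base < threshold then (points.length : Int)
      else
        match pvScanB points threshold base 1 with
        | some j => 1 + (((j : Nat) + 1) / 2 : Nat)   -- '//' on nonnegative ints = Nat division (exact)
        | none => 0   -- StopIteration (unreachable under Pre_)

-- ===== PRECONDITION & SPEC =====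
-- Pre_ excludes exactly the inputs where Python A raises: the empty list (IndexError),
-- and a single-element list with threshold ≤ 0, where the guard passes and the loop reads points[1].
def Pre_minimum_points (threshold : Int) (points : List Int) : Prop :=
  points ≠ [] ∧ (points.length = 1 → 0 < threshold)
instance (threshold : Int) (points : List Int) : Decidable (Pre_minimum_points threshold points) := by
  unfold Pre_minimum_points; infer_instance

def pvWitness_minimum_points : Int × List Int := (3, [1, 2, 4, 7])

def Spec_minimum_points (threshold : Int) (points : List Int) (out : Int) : Prop := out = minimum_points_alt threshold points
instance (threshold : Int) (points : List Int) (out : Int) : Decidable (Spec_minimum_points threshold points out) := by unfold Spec_minimum_points; infer_instance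

-- ===== CLAIM (what is proved, stated in full; the proofs are below) =====
def Claim_equal_minimum_points : Prop := ∀ (threshold : Int) (points : List Int), Dom_minimum_points threshold points → Pre_minimum_points threshold points → Spec_minimum_points threshold points (minimum_points threshold points)

-- ===== LEMMAS AND PROOFS =====

lemma pvScanB_ge (points : List Int) (threshold base : Int) (i j : Nat)
    (h : pvScanB points threshold base i = some j) : i ≤ j := by
  fun_induction pvScanB points threshold base i with
  | case1 => simp_all
  | case2 _ _ _ ih => exact Nat.le_of_succ_le (ih h)
  | case3 => simp_all

lemma pvGetNat_none (points : List Int) (i : Nat)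
    (h : PySem.List.pyGet? points (i : Int) = none) : points.length ≤ i := by
  simp only [PySem.List.pyGet?_natCast] at h
  simpa using h

lemma pvGetNat_some (points : List Int) (i : Nat) (v : Int)
    (h : PySem.List.pyGet? points (i : Int) = some v) :
    ∃ hl : i < points.length, points[i] = v := by
  simp only [PySem.List.pyGet?_natCast] at h
  exact List.getElem?_eq_some_iff.mp h

lemma pvGetNat_succ (points : List Int) (i : Nat) :
    PySem.List.pyGet? points ((i : Int) + 1) = PySem.List.pyGet? points ((i + 1 : Nat) : Int) := by
  norm_cast

-- A's loop from index i with counter c equals c + 1 + (j - i)/2 where j is the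
-- first meeting index ≥ i; both sides return 0 when no index meets (Python raises there).
lemma pvLoopA_eq_scan (points : List Int) (threshold base : Int) (i : Nat) (c : Int) :
    pvLoopA points threshold base i c =
      match pvScanB points threshold base i with
      | some j => c + 1 + (((j - i) / 2 : Nat) : Int)
      | none => 0 := by
  fun_induction pvLoopA points threshold base i c with
  | case1 i c h1 =>
    have hlen := pvGetNat_none points i h1
    rw [pvScanB]
    simp [show ¬ i < points.length by omega]
  | case2 i c v h1 hmeet =>
    obtain ⟨hi, hv⟩ := pvGetNat_some points i v h1
    rw [pvScanB]
    simp [hi, hv, hmeet]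
  | case3 i c v h1 hmeet h2 =>
    obtain ⟨hi, hv⟩ := pvGetNat_some points i v h1
    rw [pvGetNat_succ] at h2
    have hlen := pvGetNat_none points (i + 1) h2
    rw [pvScanB, pvScanB]
    simp [hi, hv, hmeet, show ¬ i + 1 < points.length by omega]
  | case4 i c v h1 hmeet w h2 hmeet2 =>
    obtain ⟨hi, hv⟩ := pvGetNat_some points i v h1
    rw [pvGetNat_succ] at h2
    obtain ⟨hi2, hw⟩ := pvGetNat_some points (i + 1) w h2
    rw [pvScanB, pvScanB]
    simp [hi, hv, hmeet, hi2, hw, hmeet2]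
  | case5 i c v h1 hmeet w h2 hmeet2 ih =>
    obtain ⟨hi, hv⟩ := pvGetNat_some points i v h1
    rw [pvGetNat_succ] at h2
    obtain ⟨hi2, hw⟩ := pvGetNat_some points (i + 1) w h2
    rw [ih]
    conv_rhs => rw [pvScanB]
    simp only [hi, dif_pos, hv, hmeet, if_neg]
    conv_rhs => rw [pvScanB]
    simp only [hi2, dif_pos, hw, hmeet2, if_neg]
    rcases hs : pvScanB points threshold base (i + 2) with _ | j
    · simp only [hs]
      norm_num
    · have hj : i + 2 ≤ j := pvScanB_ge _ _ _ _ _ hs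
      simp only [hs]
      norm_num
      rw [show j - i = (j - (i + 2)) + 2 by omega]
      push_cast
      rw [show ((j - (i + 2) : Nat) : Int) + 2 = ((j - (i + 2) : Nat) : Int) + 1 * 2 by ring,
        Int.add_mul_ediv_right _ _ (by norm_num : (2:Int) ≠ 0)]
      ring

-- ===== VERDICT (by name: the statement is the Claim_ definition above) =====
theorem minimum_points_spec : Claim_equal_minimum_points := by
  intro threshold points _hdom hpre
  obtain ⟨hne, h1⟩ := hpre
  unfold Spec_minimum_points minimum_points minimum_points_alt
  have h0 : PySem.List.pyGet? points 0 = some (points.head hne) := by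
    cases points with
    | nil => exact absurd rfl hne
    | cons a l => simp [PySem.List.pyGet?_zero_cons]
  have hlast : PySem.List.pyGet? points (-1) = some (points.getLast hne) := by
    rw [PySem.List.pyGet?_neg_one, List.getLast?_eq_some_getLast]
  simp only [h0, hlast]
  split
  · rfl
  · rw [pvLoopA_eq_scan]
    rcases hs : pvScanB points threshold (points.head hne) 1 with _ | j
    · simp only [hs]
    · simp only [hs]
      have hj : 1 ≤ j := pvScanB_ge _ _ _ _ _ hs
      norm_num
      rw [show ((j : Nat) : Int) = ((j - 1 : Nat) : Int) + 1 by omega,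
        show ((j - 1 : Nat) : Int) + 1 + 1 = ((j - 1 : Nat) : Int) + 1 * 2 by ring,
        Int.add_mul_ediv_right _ _ (by norm_num : (2:Int) ≠ 0)]
      ring
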